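-- pv_equiv track=rewrite | github.com/Source-Machine-Ent/Algorithm-class | JOLLA/programmers/printer.py | solution
-- ===== SOURCE A (Python) =====
-- from collections import deque
--
-- def solution(priorities, location):
--     answer = 0
--     d = deque([(v, i) for i, v in enumerate(priorities)])
--
--     while d:
--         # 맨 앞에꺼 빼서 비교 할 예정
--         pre_val = d.popleft()
--
--         if len(d) != 0:
--             if pre_val[0] < max(d)[0]:
--                 d.append(pre_val)
--             else: #J 인쇄
--                 answer += 1
--                 if pre_val[1] == location:
--                     break
--         else:
--             answer += 1
--             if pre_val[1] == location:
--                 break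
--
--
--     return answer
-- ===== SOURCE B (Python) =====
-- def solution(priorities, location):
--     # Process documents level by level, highest priority first; within a level the
--     # queue prints in cyclic index order starting right after the last printed document.
--     answer = 0
--     start = 0
--     for p in sorted(set(priorities), reverse=True):
--         idxs = [i for i, v in enumerate(priorities) if v == p]
--         for i in [i for i in idxs if i >= start] + [i for i in idxs if i < start]:
--             answer += 1
--             if i == location:
--                 return answer
--             start = i + 1
--     return answer
-- ===== Notes on version B (the rewrite author's own statement) =====
-- stated objective: faster
-- what changed: Replaces the deque simulation (rotate the queue and rescan max(d) at every step) by one pass per priority level: collect the indices of each priority once, walk the distinct priorities in descending order, and print each level in cyclic index order starting right after the last printed document.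
import Mathlib
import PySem

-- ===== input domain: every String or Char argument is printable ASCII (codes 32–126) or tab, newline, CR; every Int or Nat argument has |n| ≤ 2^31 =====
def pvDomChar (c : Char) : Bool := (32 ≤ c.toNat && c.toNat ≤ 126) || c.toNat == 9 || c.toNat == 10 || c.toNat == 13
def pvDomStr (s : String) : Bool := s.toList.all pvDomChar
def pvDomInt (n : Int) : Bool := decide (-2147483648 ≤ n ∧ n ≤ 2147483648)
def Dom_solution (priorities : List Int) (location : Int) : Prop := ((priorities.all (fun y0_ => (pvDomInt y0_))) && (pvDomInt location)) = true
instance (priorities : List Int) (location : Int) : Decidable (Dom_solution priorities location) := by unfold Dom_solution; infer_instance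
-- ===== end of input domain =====

-- B replaces A's deque simulation (rotate + rescan max every step) by one cyclic pass
-- per priority level, highest priority first; proved to return the same value on all inputs.

-- ===== PORT A =====
-- termination measure for A's while-loop: queue length (squared) plus the distance
-- from the front to the first maximal-priority element (a rotation shrinks the latter).
-- pvStep/pvMax2_* restate Python max() on tuples (no max2? lemmas exist in the PySem book).
def pvFirstMaxIdx (d : List (Int × Int)) : Nat :=
  d.findIdx (fun x => decide (∀ y ∈ d, y.1 ≤ x.1))

def pvMeasure (d : List (Int × Int)) : Nat := d.length * d.length + pvFirstMaxIdx d

def pvStep : Option (Int × Int) → (Int × Int) → Option (Int × Int) := fun acc x =>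
  match acc with
  | none => some x
  | some m => if (decide (m.1 < x.1) || !decide (x.1 < m.1) && decide (m.2 < x.2)) = true then some x else some m

theorem pvMax2_eq_foldl (l : List (Int × Int)) :
    PySem.List.max2? l (fun x => x.1) (fun x => x.2) = l.foldl pvStep none := by
  rw [PySem.List.max2?]
  congr 1
  funext acc x
  cases acc <;> simp [pvStep]

theorem pvFoldMax_sound : ∀ (l : List (Int × Int)) (a m : Int × Int),
    l.foldl pvStep (some a) = some m → (m = a ∨ m ∈ l) ∧ a.1 ≤ m.1 ∧ ∀ y ∈ l, y.1 ≤ m.1 := by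
  intro l
  induction l with
  | nil => intro a m h; simp_all
  | cons x t ih =>
    intro a m h
    simp only [List.foldl_cons, pvStep] at h
    by_cases hc : (decide (a.1 < x.1) || !decide (x.1 < a.1) && decide (a.2 < x.2)) = true
    · rw [if_pos hc] at h
      obtain ⟨h1, h2, h3⟩ := ih x m h
      have hax : a.1 ≤ x.1 := by
        rcases Bool.or_eq_true_iff.mp hc with h' | h'
        · exact le_of_lt (by simpa using h')
        · simp at h'; omega
      refine ⟨?_, by omega, ?_⟩
      · rcases h1 with h1 | h1 <;> simp [h1]
      · intro y hy; rcases List.mem_cons.mp hy with rfl | hy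
        · omega
        · exact h3 y hy
    · rw [if_neg hc] at h
      obtain ⟨h1, h2, h3⟩ := ih a m h
      have hxa : x.1 ≤ a.1 := by
        simp only [Bool.or_eq_true, Bool.and_eq_true, Bool.not_eq_true', decide_eq_true_eq, decide_eq_false_iff_not] at hc
        omega
      refine ⟨?_, h2, ?_⟩
      · rcases h1 with h1 | h1 <;> simp [h1]
      · intro y hy; rcases List.mem_cons.mp hy with rfl | hy
        · omega
        · exact h3 y hy


theorem pvMax2_sound {l : List (Int × Int)} {m : Int × Int}
    (h : PySem.List.max2? l (fun x => x.1) (fun x => x.2) = some m) :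
    m ∈ l ∧ ∀ y ∈ l, y.1 ≤ m.1 := by
  cases l with
  | nil => rw [pvMax2_eq_foldl] at h; simp at h
  | cons x t =>
    rw [pvMax2_eq_foldl] at h
    simp only [List.foldl_cons, pvStep] at h
    obtain ⟨h1, h2, h3⟩ := pvFoldMax_sound t x m h
    constructor
    · rcases h1 with rfl | h1
      · exact List.mem_cons_self ..
      · exact List.mem_cons_of_mem _ h1
    · intro y hy; rcases List.mem_cons.mp hy with rfl | hy
      · exact h2
      · exact h3 y hy


theorem pvMeasure_pop (p : Int × Int) (rest : List (Int × Int)) :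
    pvMeasure rest < pvMeasure (p :: rest) := by
  have h1 : pvFirstMaxIdx rest ≤ rest.length := List.findIdx_le_length
  have h2 : rest.length * rest.length + rest.length < (rest.length + 1) * (rest.length + 1) := by
    nlinarith [rest.length.zero_le]
  have : pvMeasure rest ≤ rest.length * rest.length + rest.length := by
    unfold pvMeasure; omega
  unfold pvMeasure
  simp only [List.length_cons]
  omega

theorem pvMeasure_rot (p : Int × Int) (rest : List (Int × Int)) (m : Int × Int)
    (hm : PySem.List.max2? rest (fun x => x.1) (fun x => x.2) = some m)
    (hlt : p.1 < m.1) :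
    pvMeasure (rest ++ [p]) < pvMeasure (p :: rest) := by
  obtain ⟨hmem, hmax⟩ := pvMax2_sound hm
  -- the two member-bounded predicates agree pointwise (same underlying multiset)
  have hpred : (fun x : Int × Int => decide (∀ y ∈ rest ++ [p], y.1 ≤ x.1))
      = (fun x : Int × Int => decide (∀ y ∈ p :: rest, y.1 ≤ x.1)) := by
    funext x
    apply decide_eq_decide.mpr
    constructor
    · intro h y hy
      rcases List.mem_cons.mp hy with rfl | hy
      · exact h y (by simp)
      · exact h y (by simp [hy])
    · intro h y hy
      rcases List.mem_append.mp hy with hy | hy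
      · exact h y (by simp [hy])
      · simp at hy; subst hy; exact h y (by simp)
  have hpfalse : (decide (∀ y ∈ p :: rest, y.1 ≤ p.1)) = false := by
    simp only [decide_eq_false_iff_not]
    intro h
    exact absurd (h m (by simp [hmem])) (by omega)
  have hmtrue : (decide (∀ y ∈ p :: rest, y.1 ≤ m.1)) = true := by
    simp only [decide_eq_true_eq]
    intro y hy
    rcases List.mem_cons.mp hy with rfl | hy
    · omega
    · exact hmax y hy
  have hfound : rest.findIdx (fun x => decide (∀ y ∈ p :: rest, y.1 ≤ x.1)) < rest.length := by
    rw [List.findIdx_lt_length]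
    exact ⟨m, hmem, hmtrue⟩
  unfold pvMeasure pvFirstMaxIdx
  rw [hpred, List.findIdx_append, if_pos hfound, List.findIdx_cons]
  simp only [hpfalse, cond_false, List.length_append, List.length_cons, List.length_nil, Nat.zero_add]
  omega

def pvLoopA (location : Int) (answer : Int) (d : List (Int × Int)) : Int :=
  match d with
  | [] => answer
  | pre_val :: rest =>
    if rest.isEmpty then answer + 1
    else
      match hm : PySem.List.max2? rest (fun x => x.1) (fun x => x.2) with
      | none => answer + 1  -- unreachable: max2? of a nonempty list is some _
      | some m =>
        if hlt : pre_val.1 < m.1 then pvLoopA location answer (rest ++ [pre_val])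
        else if pre_val.2 = location then answer + 1
        else pvLoopA location (answer + 1) rest
termination_by pvMeasure d
decreasing_by
  · exact pvMeasure_rot pre_val rest m hm hlt
  · exact pvMeasure_pop pre_val rest

def solution (priorities : List Int) (location : Int) : Int :=
  pvLoopA location 0 ((PySem.List.enumerate priorities).map (fun iv => (iv.2, iv.1)))

-- ===== PORT B =====
-- inner loop of Source B: walk the level's cyclic index list; Sum.inl = early return
def pvInner (location : Int) : Int → Int → List Int → Sum Int (Int × Int)
  | answer, start, [] => Sum.inr (answer, start)
  | answer, _start, i :: rest =>
    if i = location then Sum.inl (answer + 1)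
    else pvInner location (answer + 1) (i + 1) rest

def pvOuter (priorities : List Int) (location : Int) : Int → Int → List Int → Int
  | answer, _start, [] => answer
  | answer, start, p :: ps =>
    let idxs := ((PySem.List.enumerate priorities).filter (fun iv => decide (iv.2 = p))).map (fun iv => iv.1)
    let wrap := idxs.filter (fun i => decide (start ≤ i)) ++ idxs.filter (fun i => decide (i < start))
    match pvInner location answer start wrap with
    | Sum.inl r => r
    | Sum.inr (a', s') => pvOuter priorities location a' s' ps

def solution_alt (priorities : List Int) (location : Int) : Int :=
  pvOuter priorities location 0 0
    (PySem.List.sorted (PySem.Set.ofList priorities) (fun x => x) true)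

-- ===== PRECONDITION & SPEC =====
def Spec_solution (priorities : List Int) (location : Int) (out : Int) : Prop := out = solution_alt priorities location
instance (priorities : List Int) (location : Int) (out : Int) : Decidable (Spec_solution priorities location out) := by unfold Spec_solution; infer_instance

-- ===== CLAIM (what is proved, stated in full; the proofs are below) =====
def Claim_equal_solution : Prop := ∀ (priorities : List Int) (location : Int), Dom_solution priorities location → Spec_solution priorities location (solution priorities location)

-- ===== LEMMAS AND PROOFS =====

theorem pvFoldMax_some : ∀ (l : List (Int × Int)) (a : Int × Int),
    ∃ m, l.foldl pvStep (some a) = some m := by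
  intro l
  induction l with
  | nil => intro a; exact ⟨a, rfl⟩
  | cons x t ih =>
    intro a
    simp only [List.foldl_cons, pvStep]
    by_cases hc : (decide (a.1 < x.1) || !decide (x.1 < a.1) && decide (a.2 < x.2)) = true
    · rw [if_pos hc]; exact ih x
    · rw [if_neg hc]; exact ih a

theorem pvMax2_some {l : List (Int × Int)} (h : l ≠ []) :
    ∃ m, PySem.List.max2? l (fun x => x.1) (fun x => x.2) = some m := by
  cases l with
  | nil => exact absurd rfl h
  | cons x t =>
    rw [pvMax2_eq_foldl]
    simp only [List.foldl_cons, pvStep]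
    exact pvFoldMax_some t x

-- the initial deque of A, as (priority, index) pairs
def pvPairs (priorities : List Int) : List (Int × Int) :=
  (PySem.List.enumerate priorities).map (fun iv => (iv.2, iv.1))

-- the deque A holds when the remaining documents are R and the next printable index is s:
-- R in cyclic index order starting at s
def pvQ (R : List (Int × Int)) (s : Int) : List (Int × Int) :=
  R.filter (fun y => decide (s ≤ y.2)) ++ R.filter (fun y => decide (y.2 < s))

def pvSortedIdx (R : List (Int × Int)) : Prop := R.Pairwise (fun a b => a.2 < b.2)

-- unfolding equations for pvLoopA
theorem pvLoopA_nil (L ans : Int) : pvLoopA L ans [] = ans := by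
  rw [pvLoopA]

theorem pvLoopA_one (L ans : Int) (p : Int × Int) : pvLoopA L ans [p] = ans + 1 := by
  rw [pvLoopA]; rfl

theorem pvLoopA_rot (L ans : Int) (p m : Int × Int) (rest : List (Int × Int))
    (hm : PySem.List.max2? rest (fun x => x.1) (fun x => x.2) = some m)
    (hlt : p.1 < m.1) :
    pvLoopA L ans (p :: rest) = pvLoopA L ans (rest ++ [p]) := by
  have hne : rest ≠ [] := by rintro rfl; rw [pvMax2_eq_foldl] at hm; simp at hm
  rw [pvLoopA]
  rw [if_neg (by simp [hne])]
  split
  · rename_i heq; rw [heq] at hm; exact absurd hm (by simp)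
  · rename_i m' heq; rw [heq] at hm
    injection hm with hm; subst hm
    rw [dif_pos hlt]

theorem pvLoopA_print (L ans : Int) (p m : Int × Int) (rest : List (Int × Int))
    (hne : rest ≠ [])
    (hm : PySem.List.max2? rest (fun x => x.1) (fun x => x.2) = some m)
    (hge : ¬ p.1 < m.1) :
    pvLoopA L ans (p :: rest) =
      if p.2 = L then ans + 1 else pvLoopA L (ans + 1) rest := by
  rw [pvLoopA]
  rw [if_neg (by simp [hne])]
  split
  · rename_i heq; rw [heq] at hm; exact absurd hm (by simp)
  · rename_i m' heq; rw [heq] at hm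
    injection hm with hm; subst hm
    rw [dif_neg hge]

-- rotation lemma: cycling past a prefix of strictly sub-maximal elements does not change the result
theorem pvRot (L : Int) : ∀ (pre : List (Int × Int)) (rest : List (Int × Int)) (ans : Int)
    (x : Int × Int), x ∈ rest → (∀ y ∈ pre, y.1 < x.1) →
    pvLoopA L ans (pre ++ rest) = pvLoopA L ans (rest ++ pre) := by
  intro pre
  induction pre with
  | nil => intro rest ans x _ _; simp
  | cons a pre ih =>
    intro rest ans x hx hlt
    have hx1 : x ∈ pre ++ rest := List.mem_append_right _ hx
    have hne : pre ++ rest ≠ [] := by rintro h; rw [h] at hx1; simp at hx1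
    obtain ⟨m, hm⟩ := pvMax2_some hne
    obtain ⟨_, hmax⟩ := pvMax2_sound hm
    have hax : a.1 < m.1 := lt_of_lt_of_le (hlt a (by simp)) (hmax x hx1)
    calc pvLoopA L ans (a :: pre ++ rest)
        = pvLoopA L ans ((pre ++ rest) ++ [a]) := pvLoopA_rot L ans a m _ hm hax
      _ = pvLoopA L ans (pre ++ (rest ++ [a])) := by rw [List.append_assoc]
      _ = pvLoopA L ans ((rest ++ [a]) ++ pre) := by
            exact ih (rest ++ [a]) ans x (List.mem_append_left _ hx)
              (fun y hy => hlt y (by simp [hy]))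
      _ = pvLoopA L ans (rest ++ a :: pre) := by simp


-- ordered split of an index-sorted list at a threshold
theorem pvFilter_split {R : List (Int × Int)} (hR : pvSortedIdx R) (t : Int) :
    R.filter (fun y => decide (y.2 < t)) ++ R.filter (fun y => decide (t ≤ y.2)) = R := by
  induction R with
  | nil => simp
  | cons a R ih =>
    rw [pvSortedIdx, List.pairwise_cons] at hR
    obtain ⟨ha, hR'⟩ := hR
    by_cases h : a.2 < t
    · simp only [List.filter_cons, decide_eq_true_eq, if_pos h,
        if_neg (by omega : ¬ t ≤ a.2)]
      simpa using ih hR'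
    · simp only [List.filter_cons, decide_eq_true_eq, if_neg h,
        if_pos (by omega : t ≤ a.2)]
      have h1 : R.filter (fun y => decide (y.2 < t)) = [] :=
        List.filter_eq_nil_iff.mpr (fun y hy => by simp; have := ha y hy; omega)
      have h2 : R.filter (fun y => decide (t ≤ y.2)) = R :=
        List.filter_eq_self.mpr (fun y hy => by simp; have := ha y hy; omega)
      simp [h1, h2]

-- the element with a given index is unique in an index-sorted list
theorem pvMemEq {R : List (Int × Int)} (hR : pvSortedIdx R) {x y : Int × Int}
    (hx : x ∈ R) (hy : y ∈ R) (hxy : y.2 = x.2) : y = x := by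
  induction R with
  | nil => simp at hx
  | cons a R ih =>
    rw [pvSortedIdx, List.pairwise_cons] at hR
    obtain ⟨ha, hR'⟩ := hR
    rcases List.mem_cons.mp hx with rfl | h1 <;>
      rcases List.mem_cons.mp hy with rfl | h2
    · rfl
    · exact absurd hxy (by have := ha y h2; omega)
    · exact absurd hxy (by have := ha x h1; omega)
    · exact ih hR' h1 h2

theorem pvSplit_at {R : List (Int × Int)} (hR : pvSortedIdx R) {x : Int × Int} (hx : x ∈ R) :
    R = R.filter (fun y => decide (y.2 < x.2)) ++ x :: R.filter (fun y => decide (x.2 < y.2)) := by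
  have h0 := (pvFilter_split hR x.2).symm
  have h1 : R.filter (fun y => decide (x.2 ≤ y.2)) = x :: R.filter (fun y => decide (x.2 < y.2)) := by
    have hp : pvSortedIdx (R.filter (fun y => decide (x.2 ≤ y.2))) := List.Pairwise.filter _ hR
    have hxm : x ∈ R.filter (fun y => decide (x.2 ≤ y.2)) :=
      List.mem_filter.mpr ⟨hx, by simp⟩
    cases hfe : R.filter (fun y => decide (x.2 ≤ y.2)) with
    | nil => rw [hfe] at hxm; simp at hxm
    | cons b tl =>
      rw [hfe] at hxm hp
      -- b has the least index among the filtered elements, and x.2 ≤ b.2, so b = x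
      have hbR : b ∈ R := (List.mem_filter.mp (by rw [hfe]; simp)).1
      have hb2 : x.2 ≤ b.2 := by
        have := (List.mem_filter.mp (show b ∈ R.filter (fun y => decide (x.2 ≤ y.2)) by rw [hfe]; simp)).2
        simpa using this
      rw [pvSortedIdx, List.pairwise_cons] at hp
      have hbx : b = x := by
        rcases List.mem_cons.mp hxm with rfl | hxm
        · rfl
        · have := hp.1 x hxm; exact absurd hb2 (by omega)
      subst hbx
      congr 1
      -- tl = elements of R with index > b.2
      have : R.filter (fun y => decide (b.2 ≤ y.2)) = b :: tl := hfe
      have h2 : R.filter (fun y => decide (b.2 < y.2)) =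
          (R.filter (fun y => decide (b.2 ≤ y.2))).filter (fun y => decide (b.2 < y.2)) := by
        rw [List.filter_filter]
        exact (List.filter_congr (fun y _ => by
          rcases lt_or_ge b.2 y.2 with h | h <;> simp [h, not_lt_of_ge, le_of_lt])).symm
      rw [h2, hfe, List.filter_cons, if_neg (by simp)]
      exact (List.filter_eq_self.mpr (fun y hy => by
        simp only [decide_eq_true_eq]
        have := hp.1 y hy
        omega)).symm
  rw [h1] at h0
  exact h0

-- two decompositions around the same unique pivot coincide
theorem pvDecompUnique : ∀ {p1 : List (Int × Int)} {q1 p2 q2 : List (Int × Int)} {x : Int × Int},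
    p1 ++ x :: q1 = p2 ++ x :: q2 → (∀ y ∈ p1, y.2 ≠ x.2) → (∀ y ∈ p2, y.2 ≠ x.2) →
    p1 = p2 ∧ q1 = q2 := by
  intro p1
  induction p1 with
  | nil =>
    intro q1 p2 q2 x h _ hp2
    cases p2 with
    | nil => simp at h; exact ⟨rfl, h⟩
    | cons b p2 =>
      simp only [List.nil_append, List.cons_append, List.cons.injEq] at h
      exact absurd (by rw [h.1]) (hp2 b (by simp))
  | cons a p1 ih =>
    intro q1 p2 q2 x h hp1 hp2
    cases p2 with
    | nil =>
      simp only [List.nil_append, List.cons_append, List.cons.injEq] at h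
      exact absurd (by rw [← h.1]) (hp1 a (by simp))
    | cons b p2 =>
      simp only [List.cons_append, List.cons.injEq] at h
      obtain ⟨rfl, h⟩ := h
      obtain ⟨h1, h2⟩ := ih h (fun y hy => hp1 y (by simp [hy]))
        (fun y hy => hp2 y (by simp [hy]))
      exact ⟨by rw [h1], h2⟩

-- the crux: removing the printed element x from the deque pvQ R s and restarting after
-- its index yields exactly the rotated remainder post ++ pre
theorem pvQ_remove {R : List (Int × Int)} (hR : pvSortedIdx R) {x : Int × Int} (hx : x ∈ R)
    {s : Int} {pre post : List (Int × Int)}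
    (hsplit : pvQ R s = pre ++ x :: post) (hpre : ∀ y ∈ pre, y.2 ≠ x.2) :
    pvQ (R.filter (fun y => !decide (y.2 = x.2))) (x.2 + 1) = post ++ pre := by
  have hfsorted : ∀ (c : (Int × Int) → Bool), pvSortedIdx (R.filter c) :=
    fun c => List.Pairwise.filter c hR
  -- normalize the left side to F(x.2 < ·.2) ++ F(·.2 < x.2)
  have hL : pvQ (R.filter (fun y => !decide (y.2 = x.2))) (x.2 + 1) =
      R.filter (fun y => decide (x.2 < y.2)) ++ R.filter (fun y => decide (y.2 < x.2)) := by
    unfold pvQ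
    rw [List.filter_filter, List.filter_filter]
    congr 1
    · exact List.filter_congr (fun y _ => by
        rw [← decide_not, ← Bool.decide_and]
        exact decide_eq_decide.mpr (by omega))
    · exact List.filter_congr (fun y _ => by
        rw [← decide_not, ← Bool.decide_and]
        exact decide_eq_decide.mpr (by omega))
  rw [hL]
  rcases le_or_gt s x.2 with hs | hs
  -- case s ≤ x.2 : x lies in the first half of pvQ R s
  · have hx1 : x ∈ R.filter (fun y => decide (s ≤ y.2)) :=
      List.mem_filter.mpr ⟨hx, by simp; omega⟩
    have hdec : pvQ R s =
        (R.filter (fun y => decide (s ≤ y.2))).filter (fun y => decide (y.2 < x.2)) ++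
        x :: ((R.filter (fun y => decide (s ≤ y.2))).filter (fun y => decide (x.2 < y.2)) ++
              R.filter (fun y => decide (y.2 < s))) := by
      unfold pvQ
      conv_lhs => rw [pvSplit_at (hfsorted (fun y => decide (s ≤ y.2))) hx1]
      simp only [List.append_assoc, List.cons_append]
    rw [hsplit] at hdec
    obtain ⟨hpeq, hqeq⟩ := pvDecompUnique hdec hpre
      (fun y hy => by have := (List.mem_filter.mp hy).2; simp at this; omega)
    rw [hpeq, hqeq]
    have e1 : (R.filter (fun y => decide (s ≤ y.2))).filter (fun y => decide (x.2 < y.2)) =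
        R.filter (fun y => decide (x.2 < y.2)) := by
      rw [List.filter_filter]
      exact List.filter_congr (fun y _ => by
        rw [← Bool.decide_and]; exact decide_eq_decide.mpr (by omega))
    have e2 : R.filter (fun y => decide (y.2 < x.2)) =
        R.filter (fun y => decide (y.2 < s)) ++
        (R.filter (fun y => decide (s ≤ y.2))).filter (fun y => decide (y.2 < x.2)) := by
      have h0 := pvFilter_split (hfsorted (fun y => decide (y.2 < x.2))) s
      rw [List.filter_filter, List.filter_filter] at h0
      rw [← h0]
      congr 1
      · exact List.filter_congr (fun y _ => by
          rw [← Bool.decide_and]; exact decide_eq_decide.mpr (by omega))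
      · rw [List.filter_filter]
        exact List.filter_congr (fun y _ => by
          rw [← Bool.decide_and, ← Bool.decide_and]
          exact decide_eq_decide.mpr (by omega))
    rw [e1, e2]
    simp [List.append_assoc]
  -- case x.2 < s : x lies in the wrapped-around half of pvQ R s
  · have hx1 : x ∈ R.filter (fun y => decide (y.2 < s)) :=
      List.mem_filter.mpr ⟨hx, by simp; omega⟩
    have hdec : pvQ R s =
        (R.filter (fun y => decide (s ≤ y.2)) ++
         (R.filter (fun y => decide (y.2 < s))).filter (fun y => decide (y.2 < x.2))) ++
        x :: (R.filter (fun y => decide (y.2 < s))).filter (fun y => decide (x.2 < y.2)) := by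
      unfold pvQ
      conv_lhs => rw [pvSplit_at (hfsorted (fun y => decide (y.2 < s))) hx1]
      simp only [List.append_assoc]
    rw [hsplit] at hdec
    obtain ⟨hpeq, hqeq⟩ := pvDecompUnique hdec hpre
      (fun y hy => by
        rcases List.mem_append.mp hy with hy' | hy'
        · have := (List.mem_filter.mp hy').2; simp at this; omega
        · have := (List.mem_filter.mp hy').2; simp at this; omega)
    rw [hpeq, hqeq]
    have e1 : R.filter (fun y => decide (x.2 < y.2)) =
        (R.filter (fun y => decide (y.2 < s))).filter (fun y => decide (x.2 < y.2)) ++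
        R.filter (fun y => decide (s ≤ y.2)) := by
      have h0 := pvFilter_split (hfsorted (fun y => decide (x.2 < y.2))) s
      rw [List.filter_filter, List.filter_filter] at h0
      rw [← h0]
      congr 1
      · rw [List.filter_filter]
        exact List.filter_congr (fun y _ => by
          rw [← Bool.decide_and, ← Bool.decide_and]
          exact decide_eq_decide.mpr (by omega))
      · exact List.filter_congr (fun y _ => by
          rw [← Bool.decide_and]; exact decide_eq_decide.mpr (by omega))
    have e2 : R.filter (fun y => decide (y.2 < x.2)) =
        (R.filter (fun y => decide (y.2 < s))).filter (fun y => decide (y.2 < x.2)) := by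
      rw [List.filter_filter]
      exact List.filter_congr (fun y _ => by
        rw [← Bool.decide_and]; exact decide_eq_decide.mpr (by omega))
    rw [e1, e2]
    simp [List.append_assoc]

-- membership in the cyclic view
theorem pvMem_Q {R : List (Int × Int)} {s : Int} {y : Int × Int} :
    y ∈ pvQ R s ↔ y ∈ R := by
  unfold pvQ
  simp only [List.mem_append, List.mem_filter, decide_eq_true_eq]
  constructor
  · rintro (⟨h, _⟩ | ⟨h, _⟩) <;> exact h
  · intro h
    rcases le_or_gt s y.2 with hs | hs
    · exact Or.inl ⟨h, hs⟩
    · exact Or.inr ⟨h, hs⟩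

-- simulation of one level: the inner loop of B prints exactly the priority-p documents
theorem pvInner_sim (L p : Int) : ∀ (wp : List (Int × Int)) (R : List (Int × Int)) (s ans : Int),
    pvSortedIdx R → (∀ y ∈ R, y.1 ≤ p) →
    (pvQ R s).filter (fun y => decide (y.1 = p)) = wp →
    pvLoopA L ans (pvQ R s) =
      (match pvInner L ans s (wp.map (fun y => y.2)) with
       | Sum.inl r => r
       | Sum.inr (a', s') => pvLoopA L a' (pvQ (R.filter (fun y => !decide (y.1 = p))) s')) := by
  intro wp
  induction wp with
  | nil =>
    intro R s ans hR _hle hf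
    simp only [List.map_nil, pvInner]
    have hnone : ∀ y ∈ R, ¬ y.1 = p := by
      intro y hy
      have := List.filter_eq_nil_iff.mp hf y (pvMem_Q.mpr hy)
      simpa using this
    have : R.filter (fun y => !decide (y.1 = p)) = R :=
      List.filter_eq_self.mpr (fun y hy => by simp [hnone y hy])
    rw [this]
  | cons x tp ih =>
    intro R s ans hR hle hf
    obtain ⟨pre, post, hsplit, hprep, hxp, hpostf⟩ := List.filter_eq_cons_iff.mp hf
    simp only [decide_eq_true_eq] at hxp
    have hprep' : ∀ y ∈ pre, ¬ y.1 = p := fun y hy => by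
      have := hprep y hy; simpa using this
    have hxR : x ∈ R := pvMem_Q.mp (by rw [hsplit]; exact List.mem_append_right _ (by simp))
    have hmemR : ∀ y, y ∈ pre ∨ y ∈ post → y ∈ R := by
      intro y hy
      apply pvMem_Q.mp
      rw [hsplit]
      rcases hy with hy | hy
      · exact List.mem_append_left _ hy
      · exact List.mem_append_right _ (by simp [hy])
    have hpre2 : ∀ y ∈ pre, y.2 ≠ x.2 := by
      intro y hy he
      exact hprep' y hy (by rw [pvMemEq hR hxR (hmemR y (Or.inl hy)) he, hxp])
    have hQrem := pvQ_remove hR hxR hsplit hpre2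
    have hrot : pvLoopA L ans (pvQ R s) = pvLoopA L ans (x :: (post ++ pre)) := by
      rw [hsplit]
      have := pvRot L pre (x :: post) ans x (by simp)
        (fun y hy => by
          have h1 : y.1 ≤ p := hle y (hmemR y (Or.inl hy))
          have h2 := hprep' y hy
          rw [hxp]; omega)
      rw [this]; simp
    rw [hrot]
    simp only [List.map_cons, pvInner]
    by_cases hxL : x.2 = L
    · rw [if_pos hxL]
      by_cases hpp : post ++ pre = []
      · rw [hpp, pvLoopA_one]
      · obtain ⟨m, hm⟩ := pvMax2_some hpp
        obtain ⟨hmm, _⟩ := pvMax2_sound hm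
        have hmR : m ∈ R := hmemR m (by
          rcases List.mem_append.mp hmm with h | h
          · exact Or.inr h
          · exact Or.inl h)
        rw [pvLoopA_print L ans x m _ hpp hm
          (by have := hle m hmR; omega), if_pos hxL]
    · rw [if_neg hxL]
      -- the elements left after the whole level p: removing x then the rest of level p
      -- is the same as removing level p from R
      have hRR' : (R.filter (fun y => !decide (y.2 = x.2))).filter (fun y => !decide (y.1 = p))
          = R.filter (fun y => !decide (y.1 = p)) := by
        rw [List.filter_filter]
        refine List.filter_congr (fun y hy => ?_)
        by_cases h : y.1 = p
        · simp [h]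
        · have h2 : y.2 ≠ x.2 := fun he => h (by rw [pvMemEq hR hxR hy he, hxp])
          simp [h, h2]
      have htp : (pvQ (R.filter (fun y => !decide (y.2 = x.2))) (x.2 + 1)).filter
          (fun y => decide (y.1 = p)) = tp := by
        rw [hQrem, List.filter_append, hpostf,
          List.filter_eq_nil_iff.mpr (fun y hy => by simpa using hprep' y hy),
          List.append_nil]
      have hih := ih (R.filter (fun y => !decide (y.2 = x.2))) (x.2 + 1) (ans + 1)
        (List.Pairwise.filter _ hR)
        (fun y hy => hle y (List.mem_filter.mp hy).1) htp
      rw [hRR'] at hih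
      by_cases hpp : post ++ pre = []
      · -- the deque is exhausted after printing x
        have hR1 : ∀ y ∈ R, y = x := by
          intro y hy
          by_contra hne
          have h2 : y.2 ≠ x.2 := fun he => hne (pvMemEq hR hxR hy he)
          have : y ∈ pvQ (R.filter (fun y => !decide (y.2 = x.2))) (x.2 + 1) :=
            pvMem_Q.mpr (List.mem_filter.mpr ⟨hy, by simp [h2]⟩)
          rw [hQrem, hpp] at this
          simp at this
        have hempty : R.filter (fun y => !decide (y.1 = p)) = [] :=
          List.filter_eq_nil_iff.mpr (fun y hy => by
            rw [hR1 y hy]; simp [hxp])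
        have htp0 : tp = [] := by
          rw [← htp, hQrem, hpp]; rfl
        rw [hpp, pvLoopA_one, htp0]
        simp only [List.map_nil, pvInner, hempty]
        rw [show pvQ [] (x.2 + 1) = [] from rfl, pvLoopA_nil]
      · obtain ⟨m, hm⟩ := pvMax2_some hpp
        obtain ⟨hmm, _⟩ := pvMax2_sound hm
        have hmR : m ∈ R := hmemR m (by
          rcases List.mem_append.mp hmm with h | h
          · exact Or.inr h
          · exact Or.inl h)
        rw [pvLoopA_print L ans x m _ hpp hm
          (by have := hle m hmR; omega), if_neg hxL, ← hQrem]
        exact hih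

-- simulation of the outer loop over descending priority levels
theorem pvOuter_sim (pr : List Int) (L : Int) : ∀ (ps : List Int) (s ans : Int),
    ps.Pairwise (fun a b => b < a) →
    pvOuter pr L ans s ps =
      pvLoopA L ans (pvQ ((pvPairs pr).filter (fun y => decide (y.1 ∈ ps))) s) := by
  intro ps
  induction ps with
  | nil =>
    intro s ans _
    simp only [pvOuter, List.not_mem_nil, decide_false, List.filter_false]
    rw [show pvQ [] s = [] from rfl, pvLoopA_nil]
  | cons p ps ih =>
    intro s ans hps
    rw [List.pairwise_cons] at hps
    obtain ⟨hplt, hps'⟩ := hps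
    have hPsorted : pvSortedIdx (pvPairs pr) := by
      unfold pvPairs pvSortedIdx
      exact List.Pairwise.map _ (fun a b h => h) (PySem.List.pairwise_lt_enumerate pr 0)
    set P := pvPairs pr with hP
    set R := P.filter (fun y => decide (y.1 ∈ p :: ps)) with hRdef
    have hRsorted : pvSortedIdx R := List.Pairwise.filter _ hPsorted
    have hle : ∀ y ∈ R, y.1 ≤ p := by
      intro y hy
      have := (List.mem_filter.mp hy).2
      simp only [decide_eq_true_eq, List.mem_cons] at this
      rcases this with h | h
      · omega
      · exact le_of_lt (hplt _ h)
    -- the filtered level list of B equals the level-p elements of the cyclic deque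
    have hfp : R.filter (fun y => decide (y.1 = p)) = P.filter (fun y => decide (y.1 = p)) := by
      rw [hRdef, List.filter_filter]
      exact List.filter_congr (fun y _ => by
        by_cases h : y.1 = p <;> simp [h])
    have hcomm : ∀ (c : (Int × Int) → Bool),
        (R.filter c).filter (fun y => decide (y.1 = p)) =
        (P.filter (fun y => decide (y.1 = p))).filter c := by
      intro c
      rw [hRdef, List.filter_filter, List.filter_filter, List.filter_filter]
      exact List.filter_congr (fun y _ => by
        by_cases h : y.1 = p <;> simp [h])
    have hwrap :
        (((PySem.List.enumerate pr).filter (fun iv => decide (iv.2 = p))).map (fun iv => iv.1)).filter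
            (fun i => decide (s ≤ i)) ++
        (((PySem.List.enumerate pr).filter (fun iv => decide (iv.2 = p))).map (fun iv => iv.1)).filter
            (fun i => decide (i < s)) =
        ((pvQ R s).filter (fun y => decide (y.1 = p))).map (fun y => y.2) := by
      have hPp : P.filter (fun y => decide (y.1 = p)) =
          ((PySem.List.enumerate pr).filter (fun iv => decide (iv.2 = p))).map
            (fun iv => (iv.2, iv.1)) := by
        rw [hP]; unfold pvPairs
        rw [List.filter_map]
        rfl
      unfold pvQ
      rw [List.filter_append, List.map_append, hcomm, hcomm, hPp,
        List.filter_map, List.filter_map, List.filter_map, List.filter_map,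
        List.map_map, List.map_map]
      rfl
    have hsim := pvInner_sim L p ((pvQ R s).filter (fun y => decide (y.1 = p))) R s ans
      hRsorted hle rfl
    simp only [pvOuter]
    rw [hwrap, hsim]
    cases hpi : pvInner L ans s (((pvQ R s).filter (fun y => decide (y.1 = p))).map (fun y => y.2)) with
    | inl r => rfl
    | inr v =>
      obtain ⟨a', s'⟩ := v
      have hnext : R.filter (fun y => !decide (y.1 = p)) =
          P.filter (fun y => decide (y.1 ∈ ps)) := by
        rw [hRdef, List.filter_filter]
        refine List.filter_congr (fun y _ => ?_)
        by_cases h : y.1 = p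
        · have hnp : p ∉ ps := fun hmem => absurd (hplt p hmem) (lt_irrefl p)
          simp [h, hnp]
        · simp [h]
      rw [hnext] at hsim ⊢
      exact ih s' a' hps'

theorem pvMain (pr : List Int) (L : Int) : solution pr L = solution_alt pr L := by
  have hK : (PySem.List.sorted (PySem.Set.ofList pr) (fun x => x) true).Pairwise
      (fun a b => b < a) := by
    have h1 := PySem.List.sorted_pairwise_rev (xs := PySem.Set.ofList pr) (key := fun x : Int => x)
    have h2 : (PySem.List.sorted (PySem.Set.ofList pr) (fun x => x) true).Nodup :=
      (List.Perm.nodup_iff (PySem.List.sorted_perm _ _ _)).mpr (PySem.Set.nodup_ofList pr)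
    exact (h1.and h2).imp (fun h => lt_of_le_of_ne h.1 (Ne.symm h.2))
  have h0 := pvOuter_sim pr L (PySem.List.sorted (PySem.Set.ofList pr) (fun x => x) true) 0 0 hK
  have hmem : ∀ y ∈ pvPairs pr, y.1 ∈ pr := by
    intro y hy
    unfold pvPairs at hy
    obtain ⟨iv, hiv, rfl⟩ := List.mem_map.mp hy
    obtain ⟨k, hk, rfl⟩ := (PySem.List.mem_enumerate_iff _ _ _).mp hiv
    exact List.getElem_mem hk
  have hfull : (pvPairs pr).filter
      (fun y => decide (y.1 ∈ PySem.List.sorted (PySem.Set.ofList pr) (fun x => x) true)) =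
      pvPairs pr := by
    refine List.filter_eq_self.mpr (fun y hy => ?_)
    simp only [decide_eq_true_eq]
    rw [PySem.List.mem_sorted]
    exact (PySem.Set.mem_ofList _ _).mpr (hmem y hy)
  have hpos : ∀ y ∈ pvPairs pr, 0 ≤ y.2 := by
    intro y hy
    unfold pvPairs at hy
    obtain ⟨iv, hiv, rfl⟩ := List.mem_map.mp hy
    obtain ⟨k, hk, rfl⟩ := (PySem.List.mem_enumerate_iff _ _ _).mp hiv
    simp
  have hq : pvQ (pvPairs pr) 0 = pvPairs pr := by
    unfold pvQ
    rw [List.filter_eq_self.mpr (fun y hy => by simpa using hpos y hy),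
      List.filter_eq_nil_iff.mpr (fun y hy => by simp; exact hpos y hy),
      List.append_nil]
  rw [hfull, hq] at h0
  unfold solution solution_alt
  rw [h0]
  rfl

-- ===== VERDICT (by name: the statement is the Claim_ definition above) =====
theorem solution_spec : Claim_equal_solution := by
  intro pr L _
  unfold Spec_solution
  exact pvMain pr L
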